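-- pv_equiv track=rewrite | github.com/Juyoung4/StudyAlgorithm | COS_PRO/4차/10_소수의세제곱이몇개.py | solution
-- ===== SOURCE A (Python) =====
-- def solution(a, b):
-- 	answer = 0
-- 	c = [0]*(b+1)
-- 	for i in range(2, b+1):
-- 		for j in range(2, i):
-- 			if not i%j: break
-- 		else:
-- 			if a <= i**2 <= b or a <= i**3 <= b:
-- 				if a <= i**2 <= b:
-- 					answer += 1
-- 				if a <= i**3 <= b:
-- 					answer += 1
-- 	return answer
-- ===== SOURCE B (Python) =====
-- def solution(a, b):
--     def is_prime(n):
--         j = 2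
--         while j * j <= n:
--             if n % j == 0:
--                 return False
--             j += 1
--         return n >= 2
--
--     count = 0
--     p = 2
--     while p * p <= b:
--         if is_prime(p):
--             if a <= p * p:
--                 count += 1
--             if a <= p ** 3 <= b:
--                 count += 1
--         p += 1
--     return count
-- ===== Notes on version B (the rewrite author's own statement) =====
-- stated objective: faster
-- what changed: B iterates only over candidates p with p*p <= b (the only ones whose square or cube can fit) and tests primality with trial division bounded by j*j <= p, instead of A's scan of every i up to b with trial division over all j < i.
import Mathlib
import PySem

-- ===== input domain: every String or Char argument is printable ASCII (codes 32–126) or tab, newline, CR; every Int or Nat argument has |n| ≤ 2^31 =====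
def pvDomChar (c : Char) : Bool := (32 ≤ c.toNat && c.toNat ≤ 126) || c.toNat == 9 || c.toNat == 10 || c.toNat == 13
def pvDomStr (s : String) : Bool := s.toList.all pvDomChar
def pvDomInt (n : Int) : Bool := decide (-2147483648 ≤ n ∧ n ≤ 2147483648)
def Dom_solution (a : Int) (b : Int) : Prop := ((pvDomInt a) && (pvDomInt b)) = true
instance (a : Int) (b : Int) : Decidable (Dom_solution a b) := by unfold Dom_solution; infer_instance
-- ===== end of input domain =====

-- B scans only candidates p with p*p <= b and tests primality by divisors j with j*j <= p,
-- instead of A's scan of every i <= b with trial division over all j < i (objective: faster).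

-- ===== PORT A =====
-- inner loop 'for j in range(2, i): if not i%j: break' with for-else: true iff the loop never broke
def pvTrialLoop (i : Int) : List Int → Bool
  | [] => true
  | j :: js => if PySem.Int.mod i j == 0 then false else pvTrialLoop i js

def solution (a : Int) (b : Int) : Int :=
  let _c : List Int := List.replicate (max (b + 1) 0).toNat 0   -- c = [0]*(b+1), never read
  (PySem.List.pyRange 2 (b + 1) 1).foldl (fun answer i =>
    if pvTrialLoop i (PySem.List.pyRange 2 i 1) then
      if (a ≤ i ^ 2 ∧ i ^ 2 ≤ b) ∨ (a ≤ i ^ 3 ∧ i ^ 3 ≤ b) then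
        let answer := if a ≤ i ^ 2 ∧ i ^ 2 ≤ b then answer + 1 else answer
        if a ≤ i ^ 3 ∧ i ^ 3 ≤ b then answer + 1 else answer
      else answer
    else answer) 0

-- ===== PORT B =====
-- 'while j*j <= n: if n % j == 0: return False; j += 1; return n >= 2'
def pvIsPrimeLoop (n : Int) (j : Int) : Bool :=
  if _h : j * j ≤ n then
    if PySem.Int.mod n j == 0 then false else pvIsPrimeLoop n (j + 1)
  else
    decide (2 ≤ n)
termination_by (n + 1 - j).toNat
decreasing_by
  have hj : j ≤ n := by nlinarith [mul_self_nonneg j]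
  omega

def pvIsPrime (n : Int) : Bool := pvIsPrimeLoop n 2

-- 'while p*p <= b: if is_prime(p): …; p += 1'
def pvMainLoop (a : Int) (b : Int) (p : Int) (count : Int) : Int :=
  if _h : p * p ≤ b then
    pvMainLoop a b (p + 1)
      (if pvIsPrime p then
        let count := if a ≤ p * p then count + 1 else count
        if a ≤ p ^ 3 ∧ p ^ 3 ≤ b then count + 1 else count
      else count)
  else count
termination_by (b + 1 - p).toNat
decreasing_by
  have hp : p ≤ b := by nlinarith [mul_self_nonneg p]
  omega

def solution_alt (a : Int) (b : Int) : Int := pvMainLoop a b 2 0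

-- ===== PRECONDITION & SPEC =====
def Spec_solution (a : Int) (b : Int) (out : Int) : Prop := out = solution_alt a b
instance (a : Int) (b : Int) (out : Int) : Decidable (Spec_solution a b out) := by unfold Spec_solution; infer_instance

-- ===== CLAIM (what is proved, stated in full; the proofs are below) =====
def Claim_equal_solution : Prop := ∀ (a : Int) (b : Int), Dom_solution a b → Spec_solution a b (solution a b)

-- ===== LEMMAS AND PROOFS =====

-- the contribution both programs add for one candidate i
def pvG (a b i : Int) : Int :=
  if pvIsPrime i then
    (if a ≤ i ^ 2 ∧ i ^ 2 ≤ b then 1 else 0) + (if a ≤ i ^ 3 ∧ i ^ 3 ≤ b then 1 else 0)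
  else 0

theorem pvTrialLoop_eq_all (i : Int) (l : List Int) :
    pvTrialLoop i l = l.all (fun j => !(PySem.Int.mod i j == 0)) := by
  induction l with
  | nil => rfl
  | cons j js ih => by_cases h : PySem.Int.mod i j = 0 <;> simp [pvTrialLoop, ih, h]

theorem pvIsPrimeLoop_iff (n : Int) (j : Int) (hj : 2 ≤ j) :
    (pvIsPrimeLoop n j = true ↔ (2 ≤ n ∧ ∀ k, j ≤ k → k * k ≤ n → ¬ (k ∣ n))) := by
  rw [pvIsPrimeLoop]
  by_cases h : j * j ≤ n
  · rw [dif_pos h]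
    by_cases hd : PySem.Int.mod n j = 0
    · have hdvd : j ∣ n := (PySem.Int.mod_eq_zero_iff_dvd n j).mp hd
      simp only [hd, beq_self_eq_true, if_true]
      constructor
      · intro hfalse; exact absurd hfalse (by simp)
      · rintro ⟨h2, hall⟩; exact absurd hdvd (hall j le_rfl h)
    · have hjd : ¬ (j ∣ n) := fun hdv => hd ((PySem.Int.mod_eq_zero_iff_dvd n j).mpr hdv)
      rw [if_neg (by simpa using hd)]
      rw [pvIsPrimeLoop_iff n (j + 1) (by omega)]
      constructor
      · rintro ⟨h2, hall⟩
        refine ⟨h2, fun k hk hkk => ?_⟩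
        rcases eq_or_lt_of_le hk with rfl | h'
        · exact hjd
        · exact hall k (by omega) hkk
      · rintro ⟨h2, hall⟩; exact ⟨h2, fun k hk hkk => hall k (by omega) hkk⟩
  · rw [dif_neg h]
    simp only [decide_eq_true_eq]
    constructor
    · intro h2
      refine ⟨h2, fun k hk hkk => absurd hkk ?_⟩
      push_neg at h ⊢; nlinarith
    · exact fun hh => hh.1
termination_by (n + 1 - j).toNat
decreasing_by
  have : j ≤ n := by nlinarith [mul_self_nonneg j]
  omega

-- A's full trial division agrees with B's sqrt-bounded primality test
theorem pvPrime_char (i : Int) (hi : 2 ≤ i) :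
    pvTrialLoop i (PySem.List.pyRange 2 i 1) = pvIsPrime i := by
  have hA : pvTrialLoop i (PySem.List.pyRange 2 i 1) = true ↔
      (∀ j : Int, 2 ≤ j → j < i → ¬ (j ∣ i)) := by
    rw [pvTrialLoop_eq_all, List.all_eq_true]
    constructor
    · intro h j h2 hji hdvd
      have hm := h j (by rw [PySem.List.mem_pyRange_one]; exact ⟨h2, hji⟩)
      simp only [Bool.not_eq_true', beq_eq_false_iff_ne, ne_eq] at hm
      exact hm ((PySem.Int.mod_eq_zero_iff_dvd i j).mpr hdvd)
    · intro h j hm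
      rw [PySem.List.mem_pyRange_one] at hm
      have := h j hm.1 hm.2
      simp only [Bool.not_eq_true', beq_eq_false_iff_ne, ne_eq]
      exact fun hz => this ((PySem.Int.mod_eq_zero_iff_dvd i j).mp hz)
  have hB := pvIsPrimeLoop_iff i 2 le_rfl
  rw [Bool.eq_iff_iff, hA]
  show _ ↔ pvIsPrime i = true
  rw [pvIsPrime, hB]
  constructor
  · intro h
    exact ⟨hi, fun k h2 hkk hdvd => h k h2 (by nlinarith) hdvd⟩
  · rintro ⟨-, hall⟩ j h2 hji hdvd
    set N := i.toNat with hN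
    have hiN : (N : Int) = i := Int.toNat_of_nonneg (by omega)
    have hjN : (j.toNat : Int) = j := Int.toNat_of_nonneg (by omega)
    have hdvdN : j.toNat ∣ N := by
      rw [← Int.natCast_dvd_natCast, hiN, hjN]; exact hdvd
    have hnp : ¬ N.Prime := by
      intro hp
      rcases Nat.Prime.eq_one_or_self_of_dvd hp _ hdvdN with h1 | h1 <;> omega
    have hq : N.minFac.Prime := Nat.minFac_prime (by omega)
    have hqsq : N.minFac ^ 2 ≤ N := Nat.minFac_sq_le_self (by omega) hnp
    refine hall (N.minFac : Int) (by exact_mod_cast hq.two_le) ?_ ?_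
    · have h' : (N.minFac : Int) * N.minFac ≤ (N : Int) := by
        have := hqsq; push_cast [pow_two] at this ⊢; exact_mod_cast this
      rwa [hiN] at h'
    · rw [← hiN]; exact_mod_cast Nat.minFac_dvd N

theorem pvG_zero (a b i : Int) (hi : 2 ≤ i) (hb : b < i * i) : pvG a b i = 0 := by
  have h2 : ¬ (i ^ 2 ≤ b) := by nlinarith
  have h3 : ¬ (i ^ 3 ≤ b) := by nlinarith
  simp [pvG, h2, h3]

theorem pvMainLoop_eq_sum (a b p count : Int) (hp : 2 ≤ p) :
    pvMainLoop a b p count = count + ((PySem.List.pyRange p (b + 1) 1).map (pvG a b)).sum := by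
  rw [pvMainLoop]
  by_cases h : p * p ≤ b
  · rw [dif_pos h]
    have hpb : p ≤ b := by nlinarith
    rw [pvMainLoop_eq_sum a b (p + 1) _ (by omega)]
    rw [PySem.List.pyRange_one_cons (by omega : p < b + 1)]
    simp only [List.map_cons, List.sum_cons]
    unfold pvG
    have hsq : p ^ 2 ≤ b := by nlinarith
    have hpp : p ^ 2 = p * p := pow_two p
    split_ifs <;> simp_all <;> omega
  · rw [dif_neg h]
    have hz : ((PySem.List.pyRange p (b + 1) 1).map (pvG a b)).sum = 0 := by
      apply List.sum_eq_zero
      intro x hx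
      simp only [List.mem_map] at hx
      obtain ⟨i, hi, rfl⟩ := hx
      rw [PySem.List.mem_pyRange_one] at hi
      push_neg at h
      exact pvG_zero a b i (by omega) (by nlinarith [hi.1])
    omega
termination_by (b + 1 - p).toNat
decreasing_by
  have : p ≤ b := by nlinarith [mul_self_nonneg p]
  omega

-- A's loop body, named for the proofs (definitionally the lambda in `solution`)
def pvBodyA (a b : Int) (answer i : Int) : Int :=
  if pvTrialLoop i (PySem.List.pyRange 2 i 1) then
    if (a ≤ i ^ 2 ∧ i ^ 2 ≤ b) ∨ (a ≤ i ^ 3 ∧ i ^ 3 ≤ b) then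
      let answer := if a ≤ i ^ 2 ∧ i ^ 2 ≤ b then answer + 1 else answer
      if a ≤ i ^ 3 ∧ i ^ 3 ≤ b then answer + 1 else answer
    else answer
  else answer

theorem pvBodyA_eq (a b answer i : Int) (hi : 2 ≤ i) :
    pvBodyA a b answer i = answer + pvG a b i := by
  unfold pvBodyA pvG
  rw [pvPrime_char i hi]
  split_ifs <;> (try tauto) <;> ring

theorem pv_foldl_bodyA (a b : Int) : ∀ (l : List Int) (init : Int), (∀ i ∈ l, 2 ≤ i) →
    l.foldl (pvBodyA a b) init = init + (l.map (pvG a b)).sum := by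
  intro l
  induction l with
  | nil => simp
  | cons x t ih =>
    intro init h
    simp only [List.foldl_cons, List.map_cons, List.sum_cons]
    rw [ih _ (fun i hi => h i (List.mem_cons_of_mem _ hi)),
        pvBodyA_eq a b init x (h x List.mem_cons_self)]
    ring

theorem solution_eq_sum (a b : Int) :
    solution a b = ((PySem.List.pyRange 2 (b + 1) 1).map (pvG a b)).sum := by
  unfold solution
  show (PySem.List.pyRange 2 (b + 1) 1).foldl (pvBodyA a b) 0 = _
  rw [pv_foldl_bodyA a b _ 0
    (fun i hi => ((PySem.List.mem_pyRange_one).mp hi).1), zero_add]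

-- ===== VERDICT (by name: the statement is the Claim_ definition above) =====
theorem solution_spec : Claim_equal_solution := by
  intro a b _
  unfold Spec_solution solution_alt
  rw [solution_eq_sum, pvMainLoop_eq_sum a b 2 0 (by norm_num), zero_add]
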